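-- pv_equiv track=rewrite | github.com/ericdebelak/advent-of-code | 2020/17/tasks.py | _build_next_iteration
-- ===== SOURCE A (Python) =====
-- from copy import deepcopy
--
-- def _build_next_iteration(graph, iteration, line_modifier):
--     new_graph = deepcopy(graph)
--     next_iteration = iteration + line_modifier + 1
--     keys_to_check = range(-next_iteration, next_iteration + 1)
--     for x in keys_to_check:
--         for y in keys_to_check:
--             for z in keys_to_check:
--                 key = f'{x},{y},{z}'
--                 value = graph.get(key, False)
--                 neighbors = _count_neighbors(key, graph)
--                 if value and neighbors not in [2, 3]:
--                     new_graph[key] = False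
--                 if not value and neighbors == 3:
--                     new_graph[key] = True
--     return new_graph
--
-- def _count_neighbors(key, graph):
--     neighbors = 0
--     x, y, z = [int(x) for x in key.split(',')]
--     for x_to_check in [x + modifier for modifier in [-1, 0, 1]]:
--         for y_to_check in [y + modifier for modifier in [-1, 0, 1]]:
--             for z_to_check in [z + modifier for modifier in [-1, 0, 1]]:
--                 # skip the current key
--                 if x_to_check == x and y_to_check == y and z_to_check == z:
--                     continue
--                 if graph.get(f'{x_to_check},{y_to_check},{z_to_check}'):
--                     neighbors += 1
--     return neighbors
-- ===== SOURCE B (Python) =====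
-- def _build_next_iteration(graph, iteration, line_modifier):
--     bound = iteration + line_modifier + 1
--     # Scatter pass: every active cell in (or one step outside) the cube adds 1
--     # to each of its 26 neighbors' counts.
--     counts = {}
--     outer = range(-bound - 1, bound + 2)
--     for x in outer:
--         for y in outer:
--             for z in outer:
--                 if graph.get(f'{x},{y},{z}'):
--                     for dx in (-1, 0, 1):
--                         for dy in (-1, 0, 1):
--                             for dz in (-1, 0, 1):
--                                 if dx or dy or dz:
--                                     cell = (x + dx, y + dy, z + dz)
--                                     counts[cell] = counts.get(cell, 0) + 1
--     # Rule pass over the cube, reading the precomputed counts.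
--     new_graph = dict(graph)
--     inner = range(-bound, bound + 1)
--     for x in inner:
--         for y in inner:
--             for z in inner:
--                 key = f'{x},{y},{z}'
--                 n = counts.get((x, y, z), 0)
--                 if graph.get(key, False):
--                     if n not in (2, 3):
--                         new_graph[key] = False
--                 elif n == 3:
--                     new_graph[key] = True
--     return new_graph
-- ===== Notes on version B (the rewrite author's own statement) =====
-- stated objective: faster
-- what changed: Instead of recounting, for every cell of the cube, its 26 neighbors with one formatted-string dict lookup each (plus re-parsing the key), B makes one scatter pass that adds 1 into a tuple-keyed counts dict for each neighbor of each active cell, then one rule pass over the cube reading those counts.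
import Mathlib
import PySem

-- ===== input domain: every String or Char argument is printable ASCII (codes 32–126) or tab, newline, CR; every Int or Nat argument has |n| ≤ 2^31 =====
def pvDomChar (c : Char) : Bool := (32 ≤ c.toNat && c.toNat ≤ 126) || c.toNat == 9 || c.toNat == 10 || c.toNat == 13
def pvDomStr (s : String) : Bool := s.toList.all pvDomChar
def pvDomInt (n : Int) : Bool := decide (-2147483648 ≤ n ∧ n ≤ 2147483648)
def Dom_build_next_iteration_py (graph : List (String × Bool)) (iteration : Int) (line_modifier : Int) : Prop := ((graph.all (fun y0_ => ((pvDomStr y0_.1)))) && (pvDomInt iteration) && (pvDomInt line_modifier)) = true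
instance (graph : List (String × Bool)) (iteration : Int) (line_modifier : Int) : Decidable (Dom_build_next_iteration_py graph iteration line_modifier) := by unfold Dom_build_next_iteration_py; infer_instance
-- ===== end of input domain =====

-- B replaces A's per-cell recount of 26 formatted-key lookups by one scatter pass that
-- accumulates neighbor counts in a tuple-keyed dict, then one rule pass (objective: faster,
-- constant factor).  Return-value equivalence only (neither side mutates its argument).

-- ===== PORT A =====

-- f'{x},{y},{z}' (both Pythons format cube keys this way)
def pvFmt (x y z : Int) : String :=
  String.ofList (PySem.Int.toChars x ++ ',' :: PySem.Int.toChars y ++ ',' :: PySem.Int.toChars z)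

-- _count_neighbors(key, graph).  A only ever calls it with key = f'{x},{y},{z}', on which
-- key.split(',') has exactly three int-parsable parts; the `getD`/fallback branches below are
-- the unreachable ValueError paths of the Python.
def pvCountNeighbors (key : String) (graph : PySem.Dict String Bool) : Int :=
  let nums := ((PySem.Str.split? key ",").getD []).map (fun p => (PySem.Int.ofStr? p).getD 0)
  match nums with
  | [x, y, z] =>
    (([-1, 0, 1] : List Int).map (fun m => x + m)).foldl (fun acc xc =>
      (([-1, 0, 1] : List Int).map (fun m => y + m)).foldl (fun acc yc =>
        (([-1, 0, 1] : List Int).map (fun m => z + m)).foldl (fun acc zc =>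
          if xc = x ∧ yc = y ∧ zc = z then acc
          else if graph.getD (pvFmt xc yc zc) false then acc + 1 else acc) acc) acc) 0
  | _ => 0

def build_next_iteration_py (graph : List (String × Bool)) (iteration : Int) (line_modifier : Int) : List (String × Bool) :=
  let g : PySem.Dict String Bool := PySem.Dict.mk graph
  let next_iteration := iteration + line_modifier + 1
  let keys_to_check := PySem.List.pyRange (-next_iteration) (next_iteration + 1) 1
  (keys_to_check.foldl (fun d x =>
    keys_to_check.foldl (fun d y =>
      keys_to_check.foldl (fun d z =>
        let key := pvFmt x y z
        let value := g.getD key false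
        let neighbors := pvCountNeighbors key g
        let d := if value = true ∧ ¬(neighbors = 2 ∨ neighbors = 3) then d.insert key false else d
        if ¬value = true ∧ neighbors = 3 then d.insert key true else d) d) d) g).items

-- ===== PORT B =====

def build_next_iteration_py_alt (graph : List (String × Bool)) (iteration : Int) (line_modifier : Int) : List (String × Bool) :=
  let g : PySem.Dict String Bool := PySem.Dict.mk graph
  let bound := iteration + line_modifier + 1
  let outer := PySem.List.pyRange (-bound - 1) (bound + 2) 1
  let counts : PySem.Dict (Int × Int × Int) Int :=
    outer.foldl (fun d x =>
      outer.foldl (fun d y =>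
        outer.foldl (fun d z =>
          if g.getD (pvFmt x y z) false then
            ([-1, 0, 1] : List Int).foldl (fun d dx =>
              ([-1, 0, 1] : List Int).foldl (fun d dy =>
                ([-1, 0, 1] : List Int).foldl (fun d dz =>
                  if ¬(dx = 0 ∧ dy = 0 ∧ dz = 0) then
                    d.insert (x + dx, y + dy, z + dz)
                      (d.getD (x + dx, y + dy, z + dz) 0 + 1)
                  else d) d) d) d
          else d) d) d) PySem.Dict.empty
  let inner := PySem.List.pyRange (-bound) (bound + 1) 1
  (inner.foldl (fun d x =>
    inner.foldl (fun d y =>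
      inner.foldl (fun d z =>
        let key := pvFmt x y z
        let n := counts.getD (x, y, z) 0
        if g.getD key false then
          if ¬(n = 2 ∨ n = 3) then d.insert key false else d
        else
          if n = 3 then d.insert key true else d) d) d) g).items

-- ===== PRECONDITION & SPEC =====

def Spec_build_next_iteration_py (graph : List (String × Bool)) (iteration : Int) (line_modifier : Int) (out : List (String × Bool)) : Prop := out = build_next_iteration_py_alt graph iteration line_modifier
instance (graph : List (String × Bool)) (iteration : Int) (line_modifier : Int) (out : List (String × Bool)) : Decidable (Spec_build_next_iteration_py graph iteration line_modifier out) := by unfold Spec_build_next_iteration_py; infer_instance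

-- ===== CLAIM (what is proved, stated in full; the proofs are below) =====
def Claim_equal_build_next_iteration_py : Prop := ∀ (graph : List (String × Bool)) (iteration : Int) (line_modifier : Int), Dom_build_next_iteration_py graph iteration line_modifier → Spec_build_next_iteration_py graph iteration line_modifier (build_next_iteration_py graph iteration line_modifier)

-- ===== LEMMAS AND PROOFS =====

-- ---------- digit string machinery ----------

def pvDigits (n : Nat) : List Char :=
  if h : n < 10 then [Nat.digitChar n]
  else pvDigits (n / 10) ++ [Nat.digitChar (n % 10)]
decreasing_by exact Nat.div_lt_self (by omega) (by omega)

def pvValNat (cs : List Char) : Nat :=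
  cs.foldl (fun a c => a * 10 + (c.toNat - 48)) 0

theorem pv_digitChar_isDigit (r : Nat) (h : r < 10) : (Nat.digitChar r).isDigit = true := by
  interval_cases r <;> decide

theorem pv_digitChar_toNat (r : Nat) (h : r < 10) : (Nat.digitChar r).toNat - 48 = r := by
  interval_cases r <;> decide

theorem pv_toDigitsCore_eq (f : Nat) : ∀ (n : Nat) (ds : List Char), n < f →
    Nat.toDigitsCore 10 f n ds = pvDigits n ++ ds := by
  induction f with
  | zero => intro n ds h; omega
  | succ f ih =>
    intro n ds h
    show (let d := (n % 10).digitChar; let n' := n / 10;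
          if n' = 0 then d :: ds else Nat.toDigitsCore 10 f n' (d :: ds)) = _
    by_cases h10 : n < 10
    · have : n / 10 = 0 := by omega
      simp only [this]
      rw [pvDigits, dif_pos h10]
      have : n % 10 = n := by omega
      simp [this]
    · have hne : ¬ n / 10 = 0 := by omega
      simp only [if_neg hne]
      rw [ih (n / 10) _ (by omega)]
      conv_rhs => rw [pvDigits, dif_neg h10]
      simp
theorem pv_toDigits_eq (n : Nat) : Nat.toDigits 10 n = pvDigits n := by
  have := pv_toDigitsCore_eq (n + 1) n [] (by omega)
  simpa [Nat.toDigits] using this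

theorem pv_pvDigits_ne_nil (n : Nat) : pvDigits n ≠ [] := by
  rw [pvDigits]; split <;> simp

theorem pv_pvDigits_digit (n : Nat) : ∀ c ∈ pvDigits n, c.isDigit = true := by
  induction n using Nat.strong_induction_on with
  | _ n ih =>
    rw [pvDigits]
    split
    · intro c hc; simp at hc; subst hc; exact pv_digitChar_isDigit n (by omega)
    · intro c hc
      simp only [List.mem_append, List.mem_singleton] at hc
      rcases hc with hc | hc
      · exact ih (n / 10) (Nat.div_lt_self (by omega) (by omega)) c hc
      · subst hc; exact pv_digitChar_isDigit _ (Nat.mod_lt _ (by omega))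

theorem pv_pvDigits_val (n : Nat) : ∀ acc : Nat,
    (pvDigits n).foldl (fun a c => a * 10 + (c.toNat - 48)) acc
      = acc * 10 ^ (pvDigits n).length + n := by
  induction n using Nat.strong_induction_on with
  | _ n ih =>
    intro acc
    rw [pvDigits]
    split
    · next h =>
      simp [List.foldl, pv_digitChar_toNat n h]
    · next h =>
      rw [List.foldl_append]
      rw [ih (n / 10) (Nat.div_lt_self (by omega) (by omega)) acc]
      simp only [List.foldl, List.length_append, List.length_singleton]
      rw [pv_digitChar_toNat _ (Nat.mod_lt _ (by omega))]
      rw [pow_succ]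
      have h2 : n / 10 * 10 + n % 10 = n := by omega
      ring_nf
      omega

theorem pv_pvValNat_pvDigits (n : Nat) : pvValNat (pvDigits n) = n := by
  have := pv_pvDigits_val n 0
  simpa [pvValNat] using this

theorem pv_digit_not_space (c : Char) (h : c.isDigit = true) : PySem.Int.isIntSpace c = false := by
  simp only [Char.isDigit] at h
  simp only [PySem.Int.isIntSpace]
  rcases Bool.and_eq_true .. |>.mp h with ⟨h1, h2⟩
  simp only [decide_eq_true_eq] at h1 h2 ⊢
  simp only [Bool.or_eq_false_iff, decide_eq_false_iff_not]
  refine ⟨⟨⟨⟨⟨?_, ?_⟩, ?_⟩, ?_⟩, ?_⟩, ?_⟩ <;> rintro rfl <;> simp_all <;> omega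

theorem pv_dropWhile_noSpace (l : List Char) (h : ∀ c ∈ l, PySem.Int.isIntSpace c = false) :
    l.dropWhile PySem.Int.isIntSpace = l := by
  rw [List.dropWhile_eq_self_iff]
  intro hl
  rw [h _ (l.getElem_mem hl)]
  simp

theorem pv_ofChars_both (cs : List Char) (hne : cs ≠ []) (hd : ∀ c ∈ cs, c.isDigit = true) :
    PySem.Int.ofChars? cs = some ((pvValNat cs : Nat) : Int) ∧
    PySem.Int.ofChars? ('-' :: cs) = some (-((pvValNat cs : Nat) : Int)) := by
  obtain ⟨dv, go, hdv, hlink, hnil, hstep⟩ :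
      ∃ (dv : List Char → Option ℕ) (go : List Char → Bool → ℕ → Option ℕ),
      (dv = fun l => match l with | [] => none | cs => go cs false 0) ∧
      (∀ s : List Char,
        PySem.Int.ofChars? s =
          PySem.Int.ofChars?.match_1 (motive := fun _ => Option ℤ)
            ((List.dropWhile PySem.Int.isIntSpace (List.dropWhile PySem.Int.isIntSpace s).reverse).reverse)
            (fun ds => Option.map (fun n => -n) (do let a ← dv ds; pure (a : ℤ)))
            (fun ds => Option.map (fun n => n) (do let a ← dv ds; pure (a : ℤ)))
            (fun ds => Option.map (fun n => n) (do let a ← dv ds; pure (a : ℤ)))) ∧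
      (∀ (b : Bool) (acc : ℕ), go [] b acc = if b = true then some acc else none) ∧
      (∀ (c : Char) (cs : List Char) (b : Bool) (acc : ℕ),
        go (c :: cs) b acc =
          if c.isDigit = true then go cs true (acc * 10 + (c.toNat - '0'.toNat))
          else if c = '_' ∧ b = true then
            (match cs with
             | d :: _ => if d.isDigit = true then go cs false acc else none
             | [] => none)
          else none) :=
    ⟨_, _, rfl, fun s => rfl, fun b acc => rfl, fun c cs b acc => rfl⟩
  have hrun : ∀ (l : List Char), (∀ c ∈ l, c.isDigit = true) → ∀ acc : ℕ,
      go l true acc = some (l.foldl (fun a c => a * 10 + (c.toNat - 48)) acc) := by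
    intro l
    induction l with
    | nil => intro _ acc; rw [hnil]; simp
    | cons c t ih =>
      intro h acc
      rw [hstep, if_pos (h c (by simp))]
      rw [ih (fun c hc => h c (by simp [hc]))]
      rfl
  have hdvrun : ∀ (l : List Char), l ≠ [] → (∀ c ∈ l, c.isDigit = true) →
      dv l = some (pvValNat l) := by
    intro l hne hd
    match l with
    | c :: t =>
      rw [hdv]
      show go (c :: t) false 0 = _
      rw [hstep, if_pos (hd c (by simp))]
      rw [hrun t (fun c hc => hd c (by simp [hc]))]
      rfl
  have hnosp : ∀ c ∈ cs, PySem.Int.isIntSpace c = false :=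
    fun c hc => pv_digit_not_space c (hd c hc)
  have hstrip : (List.dropWhile PySem.Int.isIntSpace
      (List.dropWhile PySem.Int.isIntSpace cs).reverse).reverse = cs := by
    rw [pv_dropWhile_noSpace cs hnosp, pv_dropWhile_noSpace _ (by
      intro c hc; exact hnosp c (List.mem_reverse.mp hc)), List.reverse_reverse]
  have hstrip2 : (List.dropWhile PySem.Int.isIntSpace
      (List.dropWhile PySem.Int.isIntSpace ('-' :: cs)).reverse).reverse = '-' :: cs := by
    have hns : ∀ c ∈ '-' :: cs, PySem.Int.isIntSpace c = false := by
      intro c hc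
      rcases List.mem_cons.mp hc with rfl | hc
      · decide
      · exact hnosp c hc
    rw [pv_dropWhile_noSpace _ hns, pv_dropWhile_noSpace _ (by
      intro c hc; exact hns c (List.mem_reverse.mp hc)), List.reverse_reverse]
  constructor
  · rw [hlink cs, hstrip]
    have hres := hdvrun cs hne hd
    split
    · exact absurd (hd '-' (by simp)) (by decide)
    · exact absurd (hd '+' (by simp)) (by decide)
    · rw [hres]; rfl
  · rw [hlink _, hstrip2]
    have hres := hdvrun cs hne hd
    split
    · next ds hds =>
      obtain rfl : cs = ds := by injection hds
      rw [hres]; rfl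
    · next ds hds => exact absurd hds (by simp)
    · next h1 h2 => exact absurd rfl (h1 cs)

theorem pv_ofChars_toChars (n : Int)
    (hval : pvValNat (Nat.toDigits 10 n.natAbs) = n.natAbs)
    (hdig : ∀ c ∈ Nat.toDigits 10 n.natAbs, c.isDigit = true)
    (hnil : Nat.toDigits 10 n.natAbs ≠ []) :
    PySem.Int.ofChars? (PySem.Int.toChars n) = some n := by
  by_cases hn : n < 0
  · have h := (pv_ofChars_both _ hnil hdig).2
    rw [PySem.Int.toChars, if_pos hn]
    rw [h, hval]
    congr 1
    omega
  · have h := (pv_ofChars_both (Nat.toDigits 10 n.toNat) ?_ ?_).1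
    rw [PySem.Int.toChars, if_neg hn, h]
    · congr 1
      have : n.toNat = n.natAbs := by omega
      rw [this, hval]
      omega
    · have : n.toNat = n.natAbs := by omega
      rw [this]; exact hnil
    · have : n.toNat = n.natAbs := by omega
      rw [this]; exact hdig

def pvSplit (l cur : List Char) : List (List Char) :=
  match l with
  | [] => [cur.reverse]
  | c :: r => if c = ',' then cur.reverse :: pvSplit r [] else pvSplit r (c :: cur)

theorem pv_go_eq (l : List Char) : ∀ (fuel : Nat) (cur : List Char) (acc : List (List Char)),
    l.length < fuel →
    PySem.Chars.splitOn.go [','] fuel l cur acc = acc.reverse ++ pvSplit l cur := by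
  induction l with
  | nil =>
    intro fuel cur acc h
    match fuel, h with
    | fuel + 1, _ =>
      show ((cur.reverse :: acc)).reverse = acc.reverse ++ pvSplit [] cur
      simp [pvSplit]
  | cons c r ih =>
    intro fuel cur acc h
    match fuel, h with
    | fuel + 1, h =>
      show (if [','].isPrefixOf (c :: r) = true then
              PySem.Chars.splitOn.go [','] fuel (List.drop [','].length (c :: r)) [] (cur.reverse :: acc)
            else PySem.Chars.splitOn.go [','] fuel r (c :: cur) acc) = _
      by_cases hc : c = ','
      · subst hc
        have hpre : [','].isPrefixOf (',' :: r) = true := by simp [List.isPrefixOf]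
        rw [if_pos hpre]
        have hdrop : List.drop ([','] : List Char).length (',' :: r) = r := rfl
        rw [hdrop]
        rw [ih fuel [] (cur.reverse :: acc) (by simpa using h)]
        simp [pvSplit]
      · have hpre : [','].isPrefixOf (c :: r) = false := by
          simp [List.isPrefixOf]; exact fun h' => absurd h'.symm hc
        rw [if_neg (by simp [hpre])]
        rw [ih fuel (c :: cur) acc (by simpa using h)]
        simp [pvSplit, hc]

theorem pv_splitOn_eq (s : List Char) : PySem.Chars.splitOn s [','] = pvSplit s [] := by
  show PySem.Chars.splitOn.go [','] (s.length + 1) s [] [] = _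
  rw [pv_go_eq s (s.length + 1) [] [] (by omega)]
  rfl

theorem pv_split?_eq (s : String) :
    PySem.Str.split? s "," = some ((pvSplit s.toList []).map String.ofList) := by
  show Option.map _ (PySem.Chars.split? s.toList (",".toList)) = _
  have : (",".toList) = [','] := by decide
  rw [this]
  show Option.map _ (if ([','] : List Char).isEmpty = true then none
    else some (PySem.Chars.splitOn s.toList [','])) = _
  rw [if_neg (by decide), pv_splitOn_eq]
  rfl

theorem pv_pvSplit_nocomma (a : List Char) (h : ',' ∉ a) : ∀ cur,
    pvSplit a cur = [cur.reverse ++ a] := by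
  induction a with
  | nil => intro cur; simp [pvSplit]
  | cons c r ih =>
    intro cur
    rw [pvSplit]
    rw [if_neg (by rintro rfl; exact h (by simp))]
    rw [ih (fun hc => h (by simp [hc]))]
    simp

theorem pv_pvSplit_append (a : List Char) (h : ',' ∉ a) : ∀ (cur rest : List Char),
    pvSplit (a ++ ',' :: rest) cur = (cur.reverse ++ a) :: pvSplit rest [] := by
  induction a with
  | nil => intro cur rest; simp [pvSplit]
  | cons c r ih =>
    intro cur rest
    rw [List.cons_append, pvSplit]
    rw [if_neg (by rintro rfl; exact h (by simp))]
    rw [ih (fun hc => h (by simp [hc]))]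
    simp

theorem pv_toChars_no_comma (n : Int) : ',' ∉ PySem.Int.toChars n := by
  intro hmem
  rw [PySem.Int.toChars] at hmem
  have hdig : ∀ c ∈ Nat.toDigits 10 n.natAbs, c.isDigit = true := by
    rw [pv_toDigits_eq]; exact pv_pvDigits_digit _
  split at hmem
  · rcases List.mem_cons.mp hmem with h | h
    · exact absurd h.symm (by decide)
    · exact absurd (hdig ',' h) (by decide)
  · have : n.toNat = n.natAbs := by omega
    rw [this] at hmem
    exact absurd (hdig ',' hmem) (by decide)

theorem pv_toStr_ofList (n : Int) : String.ofList (PySem.Int.toChars n) = PySem.Int.toStr n := by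
  rw [← PySem.Int.toList_toStr n, String.ofList_toList]

theorem pv_ofStr_toStr (n : Int) : PySem.Int.ofStr? (PySem.Int.toStr n) = some n := by
  show PySem.Int.ofChars? (PySem.Int.toStr n).toList = some n
  rw [PySem.Int.toList_toStr]
  exact pv_ofChars_toChars n (by rw [pv_toDigits_eq]; exact pv_pvValNat_pvDigits _)
    (by rw [pv_toDigits_eq]; exact pv_pvDigits_digit _)
    (by rw [pv_toDigits_eq]; exact pv_pvDigits_ne_nil _)

theorem pv_fmt_toList (x y z : Int) :
    (pvFmt x y z).toList
      = PySem.Int.toChars x ++ ',' :: (PySem.Int.toChars y ++ ',' :: PySem.Int.toChars z) := by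
  rw [pvFmt, String.toList_ofList]
  simp [List.append_assoc]

theorem pv_split_fmt (x y z : Int) :
    PySem.Str.split? (pvFmt x y z) ","
      = some [PySem.Int.toStr x, PySem.Int.toStr y, PySem.Int.toStr z] := by
  rw [pv_split?_eq, pv_fmt_toList]
  rw [pv_pvSplit_append _ (pv_toChars_no_comma x)]
  rw [pv_pvSplit_append _ (pv_toChars_no_comma y)]
  rw [pv_pvSplit_nocomma _ (pv_toChars_no_comma z)]
  simp [pv_toStr_ofList]

-- ---------- neighbor geometry ----------

def pvNeighborCells (cell : Int × Int × Int) : List (Int × Int × Int) :=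
  ([-1, 0, 1] : List Int).flatMap (fun dx =>
    ([-1, 0, 1] : List Int).flatMap (fun dy =>
      ([-1, 0, 1] : List Int).filterMap (fun dz =>
        if ¬(dx = 0 ∧ dy = 0 ∧ dz = 0) then
          some (cell.1 + dx, cell.2.1 + dy, cell.2.2 + dz)
        else none)))

def pvOffs : List (Int × Int × Int) :=
  [(-1, -1, -1), (-1, -1, 0), (-1, -1, 1), (-1, 0, -1), (-1, 0, 0), (-1, 0, 1),
   (-1, 1, -1), (-1, 1, 0), (-1, 1, 1), (0, -1, -1), (0, -1, 0), (0, -1, 1),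
   (0, 0, -1), (0, 0, 1), (0, 1, -1), (0, 1, 0), (0, 1, 1), (1, -1, -1),
   (1, -1, 0), (1, -1, 1), (1, 0, -1), (1, 0, 0), (1, 0, 1), (1, 1, -1),
   (1, 1, 0), (1, 1, 1)]

theorem pv_neighborCells_eq (c : Int × Int × Int) :
    pvNeighborCells c = pvOffs.map (fun o => (c.1 + o.1, c.2.1 + o.2.1, c.2.2 + o.2.2)) := by
  rfl

theorem pv_mem_neighborCells (p c : Int × Int × Int) :
    p ∈ pvNeighborCells c ↔
      (p ≠ c ∧ p.1 - c.1 ≤ 1 ∧ c.1 - p.1 ≤ 1 ∧ p.2.1 - c.2.1 ≤ 1 ∧ c.2.1 - p.2.1 ≤ 1 ∧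
        p.2.2 - c.2.2 ≤ 1 ∧ c.2.2 - p.2.2 ≤ 1) := by
  obtain ⟨px, py, pz⟩ := p
  obtain ⟨cx, cy, cz⟩ := c
  simp only [pvNeighborCells, List.mem_flatMap, List.mem_filterMap, List.mem_cons,
    List.not_mem_nil, or_false, Option.ite_none_right_eq_some, Option.some.injEq, ne_eq,
    Prod.mk.injEq, not_and]
  constructor
  · rintro ⟨dx, hdx, dy, hdy, dz, hdz, hne, h1, h2, h3⟩
    subst h1; subst h2; subst h3
    refine ⟨?_, by omega, by omega, by omega, by omega, by omega, by omega⟩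
    intro hx hy hz
    exact hne (by omega) (by omega) (by omega)
  · rintro ⟨h0, hb⟩
    refine ⟨px - cx, by omega, py - cy, by omega, pz - cz, by omega, ?_, by omega, by omega,
      by omega⟩
    intro hx hy hz
    exact absurd (by omega : px = cx) (fun h1 => by
      exact absurd (by omega : py = cy) (fun h2 => by
        exact absurd (by omega : pz = cz) (fun h3 => h0 h1 h2 h3)))

theorem pv_neighborCells_symm (p c : Int × Int × Int) :
    p ∈ pvNeighborCells c ↔ c ∈ pvNeighborCells p := by
  rw [pv_mem_neighborCells, pv_mem_neighborCells]
  constructor <;> (rintro ⟨h0, h⟩; refine ⟨fun he => h0 he.symm, ?_⟩; omega)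

theorem pv_neighborCells_nodup (c : Int × Int × Int) : (pvNeighborCells c).Nodup := by
  rw [pv_neighborCells_eq]
  refine List.Nodup.map ?_ (by decide)
  intro o o' h
  obtain ⟨h1, h2, h3⟩ : c.1 + o.1 = c.1 + o'.1 ∧ c.2.1 + o.2.1 = c.2.1 + o'.2.1 ∧
      c.2.2 + o.2.2 = c.2.2 + o'.2.2 := by
    refine ⟨congrArg Prod.fst h, ?_, ?_⟩
    · exact congrArg (fun p => p.2.1) h
    · exact congrArg (fun p => p.2.2) h
  obtain ⟨a, b, d⟩ := o
  obtain ⟨a', b', d'⟩ := o'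
  simp only at h1 h2 h3
  simp only [Prod.mk.injEq]
  omega

-- ---------- abbreviations ----------

def pvLook (g : PySem.Dict String Bool) (p : Int × Int × Int) : Bool :=
  g.getD (pvFmt p.1 p.2.1 p.2.2) false

def pvCnt (g : PySem.Dict String Bool) (c : Int × Int × Int) : Nat :=
  (pvNeighborCells c).countP (pvLook g)

-- ---------- A-side count bridge ----------

theorem pv_foldl3 {α : Type} (f : α → Int → Int → Int → α) (xs ys zs : List Int) (a : α) :
    xs.foldl (fun a x => ys.foldl (fun a y => zs.foldl (fun a z => f a x y z) a) a) a
      = (xs.flatMap (fun x => ys.flatMap (fun y => zs.map (fun z => (x, y, z))))).foldl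
          (fun a p => f a p.1 p.2.1 p.2.2) a := by
  induction xs generalizing a with
  | nil => rfl
  | cons x xs ihx =>
    rw [List.foldl_cons, List.flatMap_cons, List.foldl_append, ← ihx]
    congr 1
    clear ihx
    induction ys generalizing a with
    | nil => rfl
    | cons y ys ihy =>
      rw [List.foldl_cons, List.flatMap_cons, List.foldl_append, ← ihy]
      congr 1
      rw [List.foldl_map]

theorem pv_foldl_skip (P : Int × Int × Int → Prop) [DecidablePred P]
    (look : Int × Int × Int → Bool) (L : List (Int × Int × Int)) : ∀ acc : Int,
    L.foldl (fun acc o => if P o then acc else if look o then acc + 1 else acc) acc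
      = acc + ((L.filter (fun o => !(decide (P o)))).countP look : Int) := by
  induction L with
  | nil => intro acc; simp
  | cons o t ih =>
    intro acc
    rw [List.foldl_cons, List.filter_cons]
    by_cases hP : P o
    · rw [if_pos hP]
      simp only [hP, decide_true, Bool.not_true, Bool.false_eq_true, if_false]
      rw [ih acc]
    · rw [if_neg hP]
      simp only [hP, decide_false, Bool.not_false, if_pos]
      by_cases hl : look o = true
      · rw [if_pos hl, ih (acc + 1), List.countP_cons, hl]
        simp only [if_pos trivial]
        push_cast
        ring
      · rw [if_neg hl, ih acc, List.countP_cons]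
        simp only [hl]
        simp

theorem pv_countA_eq (x y z : Int) (g : PySem.Dict String Bool) :
    pvCountNeighbors (pvFmt x y z) g = (pvCnt g (x, y, z) : Int) := by
  rw [pvCountNeighbors, pv_split_fmt]
  simp only [Option.getD_some, List.map_cons, List.map_nil, pv_ofStr_toStr]
  rw [pv_foldl3 (f := fun (acc : Int) xc yc zc =>
    if xc = x ∧ yc = y ∧ zc = z then acc
    else if g.getD (pvFmt xc yc zc) false = true then acc + 1 else acc)]
  rw [pv_foldl_skip (P := fun o => o.1 = x ∧ o.2.1 = y ∧ o.2.2 = z)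
    (look := fun o => g.getD (pvFmt o.1 o.2.1 o.2.2) false)]
  have e1 : ∀ a : Int, ¬(a + -1 = a) := by intro a; omega
  have e2 : ∀ a : Int, ¬(a + 1 = a) := by intro a; omega
  have e3 : ∀ a : Int, a + 0 = a := fun a => by omega
  have hfilter : (([x + -1, x + 0, x + 1] : List Int).flatMap (fun xc =>
        ([y + -1, y + 0, y + 1] : List Int).flatMap (fun yc =>
          ([z + -1, z + 0, z + 1] : List Int).map (fun zc => (xc, yc, zc))))).filter
        (fun o => !(decide (o.1 = x ∧ o.2.1 = y ∧ o.2.2 = z)))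
      = pvNeighborCells (x, y, z) := by
    rw [pv_neighborCells_eq]
    simp only [e3, pvOffs, List.map_cons, List.map_nil, List.flatMap_cons, List.flatMap_nil,
      List.append_nil, List.cons_append, List.nil_append]
    simp only [List.filter, e1, e2, and_true, and_false, decide_true, decide_false,
      Bool.not_true, Bool.not_false]
  rw [hfilter]
  simp only [pvCnt, zero_add]
  rfl

-- ---------- B-side: the scatter counter ----------

theorem pv_foldl_ite {α β : Type} (P : β → Prop) [DecidablePred P] (f : α → β → α)
    (l : List β) : ∀ i : α,
    l.foldl (fun a x => if P x then f a x else a) i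
      = (l.filter (fun x => decide (P x))).foldl f i := by
  induction l with
  | nil => intro i; rfl
  | cons b t ih =>
    intro i
    rw [List.foldl_cons, List.filter_cons]
    by_cases hP : P b
    · simp only [hP, if_pos, decide_true]
      rw [ih, List.foldl_cons]
    · simp only [hP, decide_false, Bool.false_eq_true, if_false]
      rw [ih]

-- the literal delta triple-loop of B is the insert-fold over the 26 neighbor cells
theorem pv_scatter_eq (x y z : Int) (d : PySem.Dict (Int × Int × Int) Int) :
    (([-1, 0, 1] : List Int).foldl (fun d dx =>
      ([-1, 0, 1] : List Int).foldl (fun d dy =>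
        ([-1, 0, 1] : List Int).foldl (fun d dz =>
          if ¬(dx = 0 ∧ dy = 0 ∧ dz = 0) then
            d.insert (x + dx, y + dy, z + dz) (d.getD (x + dx, y + dy, z + dz) 0 + 1)
          else d) d) d) d)
    = (pvNeighborCells (x, y, z)).foldl (fun d nb => d.insert nb (d.getD nb 0 + 1)) d := by
  rw [pv_foldl3 (f := fun (d : PySem.Dict (Int × Int × Int) Int) dx dy dz =>
    if ¬(dx = 0 ∧ dy = 0 ∧ dz = 0) then
      d.insert (x + dx, y + dy, z + dz) (d.getD (x + dx, y + dy, z + dz) 0 + 1)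
    else d)]
  rw [pv_foldl_ite (P := fun o : Int × Int × Int => ¬(o.1 = 0 ∧ o.2.1 = 0 ∧ o.2.2 = 0))
    (f := fun (a : PySem.Dict (Int × Int × Int) Int) o =>
      a.insert (x + o.1, y + o.2.1, z + o.2.2) (a.getD (x + o.1, y + o.2.1, z + o.2.2) 0 + 1))]
  have hfil : ((([-1, 0, 1] : List Int).flatMap (fun dx =>
      ([-1, 0, 1] : List Int).flatMap (fun dy =>
        ([-1, 0, 1] : List Int).map (fun dz => (dx, dy, dz))))).filter
      (fun o => decide (¬(o.1 = 0 ∧ o.2.1 = 0 ∧ o.2.2 = 0)))) = pvOffs := by decide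
  rw [hfil]
  rw [pv_neighborCells_eq, List.foldl_map]

theorem pv_counter_getD (g : PySem.Dict String Bool) (O : List (Int × Int × Int))
    (p : Int × Int × Int) : ∀ d : PySem.Dict (Int × Int × Int) Int,
    (O.foldl (fun d c =>
        if pvLook g c then
          (pvNeighborCells c).foldl (fun d nb => d.insert nb (d.getD nb 0 + 1)) d
        else d) d).getD p 0
      = d.getD p 0 + (O.countP (fun c => pvLook g c && decide (p ∈ pvNeighborCells c)) : Int) := by
  induction O with
  | nil => intro d; simp
  | cons c t ih =>
    intro d
    rw [List.foldl_cons, List.countP_cons]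
    by_cases hl : pvLook g c = true
    · rw [if_pos hl, ih, PySem.Dict.getD_foldl_insert_add_one]
      have hcount : ((pvNeighborCells c).count p : Int)
          = if pvLook g c && decide (p ∈ pvNeighborCells c) then 1 else 0 := by
        by_cases hm : p ∈ pvNeighborCells c
        · simp only [hl, hm, decide_true, Bool.and_self, if_pos]
          rw [List.count_eq_one_of_mem (pv_neighborCells_nodup c) hm]
          simp
        · simp only [hm, decide_false, Bool.and_false, Bool.false_eq_true, if_false]
          rw [List.count_eq_zero_of_not_mem hm]
          simp
      rw [hcount]
      split_ifs <;> push_cast <;> ring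
    · rw [if_neg hl, ih]
      simp only [Bool.not_eq_true] at hl
      simp [hl]

-- ---------- the cube as a flat list ----------

theorem pv_foldl_congr_triples {α : Type} (L : List (Int × Int × Int))
    (f h : α → Int × Int × Int → α) (i : α) (he : ∀ a, ∀ p ∈ L, f a p = h a p) :
    L.foldl f i = L.foldl h i :=
  PySem.List.foldl_congr_mem L f h i (fun a p hp => he a p hp)

theorem pv_mem_cubeList (b : Int) (p : Int × Int × Int) :
    p ∈ ((PySem.List.pyRange (-b) (b + 1) 1).flatMap (fun x =>
      (PySem.List.pyRange (-b) (b + 1) 1).flatMap (fun y =>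
        (PySem.List.pyRange (-b) (b + 1) 1).map (fun z => (x, y, z)))))
    ↔ (-b ≤ p.1 ∧ p.1 ≤ b ∧ -b ≤ p.2.1 ∧ p.2.1 ≤ b ∧ -b ≤ p.2.2 ∧ p.2.2 ≤ b) := by
  obtain ⟨px, py, pz⟩ := p
  simp only [List.mem_flatMap, List.mem_map, PySem.List.mem_pyRange_one, Prod.mk.injEq]
  constructor
  · rintro ⟨x, hx, y, hy, z, hz, rfl, rfl, rfl⟩
    omega
  · rintro h
    exact ⟨px, by omega, py, by omega, pz, by omega, rfl, rfl, rfl⟩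

theorem pv_cubeList_nodup (b : Int) :
    ((PySem.List.pyRange (-b) (b + 1) 1).flatMap (fun x =>
      (PySem.List.pyRange (-b) (b + 1) 1).flatMap (fun y =>
        (PySem.List.pyRange (-b) (b + 1) 1).map (fun z => (x, y, z))))).Nodup := by
  have hr : (PySem.List.pyRange (-b) (b + 1) 1).Nodup := PySem.List.nodup_pyRange_one _ _
  have hlt : (PySem.List.pyRange (-b) (b + 1) 1).Pairwise (· < ·) :=
    PySem.List.pairwise_lt_pyRange_one _ _
  rw [List.nodup_flatMap]
  constructor
  · intro x _
    rw [List.nodup_flatMap]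
    constructor
    · intro y _
      exact hr.map (fun z z' h => by simpa using congrArg (fun p => p.2.2) h)
    · refine hlt.imp ?_
      intro y y' hlt' p hp hp'
      simp only [List.mem_map] at hp hp'
      obtain ⟨z, _, rfl⟩ := hp
      obtain ⟨z', _, he⟩ := hp'
      have h2 : y' = y := by simpa using congrArg (fun q => q.2.1) he
      omega
  · refine hlt.imp ?_
    intro x x' hlt' p hp hp'
    simp only [List.mem_flatMap, List.mem_map] at hp hp'
    obtain ⟨y, _, z, _, rfl⟩ := hp
    obtain ⟨y', _, z', _, he⟩ := hp'
    have h2 : x' = x := by simpa using congrArg (fun q => q.1) he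
    omega

-- a nodup list filtered to the members of a nodup sublist is a permutation of it
theorem pv_filter_mem_perm {α : Type} (O S : List α) (q : α → Bool)
    (hq : ∀ c, q c = true ↔ c ∈ S) (hO : O.Nodup)
    (hS : S.Nodup) (hsub : ∀ a ∈ S, a ∈ O) :
    (O.filter q).Perm S := by
  rw [List.perm_ext_iff_of_nodup (hO.filter _) hS]
  intro a
  simp only [List.mem_filter, hq]
  exact ⟨fun h => h.2, fun h => ⟨hsub a h, h⟩⟩

-- for p inside the inner cube, the counter holds exactly p's live-neighbor count
theorem pv_counts_correct (g : PySem.Dict String Bool) (bound : Int) (p : Int × Int × Int)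
    (hp : -bound ≤ p.1 ∧ p.1 ≤ bound ∧ -bound ≤ p.2.1 ∧ p.2.1 ≤ bound ∧
          -bound ≤ p.2.2 ∧ p.2.2 ≤ bound) :
    (((PySem.List.pyRange (-bound - 1) (bound + 2) 1).flatMap (fun x =>
        (PySem.List.pyRange (-bound - 1) (bound + 2) 1).flatMap (fun y =>
          (PySem.List.pyRange (-bound - 1) (bound + 2) 1).map (fun z => (x, y, z))))).foldl
      (fun d c =>
        if pvLook g c then
          (pvNeighborCells c).foldl (fun d nb => d.insert nb (d.getD nb 0 + 1)) d
        else d) PySem.Dict.empty).getD p 0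
    = (pvCnt g p : Int) := by
  have hb : (-bound - 1 : Int) = -(bound + 1) := by ring
  have hb2 : (bound + 2 : Int) = (bound + 1) + 1 := by ring
  rw [hb, hb2, pv_counter_getD, PySem.Dict.getD_empty, zero_add]
  congr 1
  have h1 : (((PySem.List.pyRange (-(bound + 1)) ((bound + 1) + 1) 1).flatMap (fun x =>
        (PySem.List.pyRange (-(bound + 1)) ((bound + 1) + 1) 1).flatMap (fun y =>
          (PySem.List.pyRange (-(bound + 1)) ((bound + 1) + 1) 1).map (fun z => (x, y, z)))))).countP
        (fun c => pvLook g c && decide (p ∈ pvNeighborCells c))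
      = (((PySem.List.pyRange (-(bound + 1)) ((bound + 1) + 1) 1).flatMap (fun x =>
        (PySem.List.pyRange (-(bound + 1)) ((bound + 1) + 1) 1).flatMap (fun y =>
          (PySem.List.pyRange (-(bound + 1)) ((bound + 1) + 1) 1).map (fun z => (x, y, z)))))).countP
        (fun c => pvLook g c && decide (c ∈ pvNeighborCells p)) := by
    refine List.countP_congr ?_
    intro c _
    rw [show decide (p ∈ pvNeighborCells c) = decide (c ∈ pvNeighborCells p) from
      decide_eq_decide.mpr (pv_neighborCells_symm p c)]
  rw [h1, ← List.countP_filter]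
  have hperm := pv_filter_mem_perm
    ((PySem.List.pyRange (-(bound + 1)) ((bound + 1) + 1) 1).flatMap (fun x =>
      (PySem.List.pyRange (-(bound + 1)) ((bound + 1) + 1) 1).flatMap (fun y =>
        (PySem.List.pyRange (-(bound + 1)) ((bound + 1) + 1) 1).map (fun z => (x, y, z)))))
    (pvNeighborCells p) (fun c => decide (c ∈ pvNeighborCells p)) (fun c => by simp)
    (pv_cubeList_nodup (bound + 1)) (pv_neighborCells_nodup p) ?_
  · exact List.Perm.countP_eq (pvLook g) hperm
  · intro a ha
    rw [pv_mem_cubeList]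
    rw [pv_mem_neighborCells] at ha
    obtain ⟨h0, h⟩ := ha
    omega

-- ---------- main ----------

theorem pv_main (graph : List (String × Bool)) (iteration line_modifier : Int) :
    build_next_iteration_py graph iteration line_modifier
      = build_next_iteration_py_alt graph iteration line_modifier := by
  simp only [build_next_iteration_py, build_next_iteration_py_alt]
  congr 1
  generalize (PySem.Dict.mk graph : PySem.Dict String Bool) = g
  generalize iteration + line_modifier + 1 = R
  simp only [pv_scatter_eq]
  simp only [pv_foldl3]
  set C := List.foldl
      (fun a (p : Int × Int × Int) =>
        if g.getD (pvFmt p.1 p.2.1 p.2.2) false = true then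
          List.foldl (fun (d : PySem.Dict (Int × Int × Int) Int) nb =>
            d.insert nb (d.getD nb 0 + 1)) a (pvNeighborCells (p.1, p.2.1, p.2.2))
        else a)
      PySem.Dict.empty
      (List.flatMap
        (fun x =>
          List.flatMap (fun y => List.map (fun z => (x, y, z)) (PySem.List.pyRange (-R - 1) (R + 2) 1))
            (PySem.List.pyRange (-R - 1) (R + 2) 1))
        (PySem.List.pyRange (-R - 1) (R + 2) 1)) with hC
  apply pv_foldl_congr_triples
  intro a p hp
  rw [pv_mem_cubeList] at hp
  have hcnt : C.getD (p.1, p.2.1, p.2.2) 0 = ((pvCnt g (p.1, p.2.1, p.2.2) : Nat) : Int) :=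
    pv_counts_correct g R (p.1, p.2.1, p.2.2) (by exact ⟨hp.1, hp.2.1, hp.2.2.1, hp.2.2.2.1, hp.2.2.2.2.1, hp.2.2.2.2.2⟩)
  simp only [hcnt, pv_countA_eq]
  by_cases hv : g.getD (pvFmt p.1 p.2.1 p.2.2) false = true <;> simp [hv]

-- ===== VERDICT (by name: the statement is the Claim_ definition above) =====
theorem build_next_iteration_py_spec : Claim_equal_build_next_iteration_py := by
  intro graph iteration line_modifier _
  unfold Spec_build_next_iteration_py
  exact pv_main graph iteration line_modifier
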